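-- pv_equiv track=rewrite | github.com/volcengine/verl | atropos/environments/intern_bootcamp/internbootcamp_lib/internbootcamp/bootcamp/eprairiepartition/eprairiepartition.py | compute_possible_m
-- ===== SOURCE A (Python) =====
-- from collections import defaultdict
-- import bisect
--
-- def compute_possible_m(a):
--     cnt1 = a.count(1)
--     n = len(a)
--     a_sorted = sorted(a)
--     freq = defaultdict(int)
--     for num in a_sorted:
--         freq[num] += 1
--
--     def is_possible(m):
--         current_freq = freq.copy()
--
--         if current_freq.get(1, 0) < m:
--             return False
--         current_freq[1] -= m
--
--         last = [1] * m
--         current_power = 2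
--         cnt = m
--
--         while current_freq.get(current_power, 0) > 0 and cnt > 0:
--             available = current_freq[current_power]
--             take = min(available, cnt)
--             current_freq[current_power] -= take
--             for i in range(take):
--                 last[i] = current_power
--             cnt = take
--             current_power *= 2
--
--         last_sorted = sorted(last)
--         remaining = []
--         for num, count in sorted(current_freq.items()):
--             if count > 0:
--                 remaining.extend([num] * count)
--
--         for num in remaining:
--             required = (num + 1) // 2
--             idx = bisect.bisect_left(last_sorted, required)
--             if idx >= len(last_sorted):
--                 return False
--             del last_sorted[idx]
--             bisect.insort(last_sorted, num)
--
--         return True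
--
--     left, right = 0, cnt1 + 1
--     while left < right - 1:
--         mid = (left + right) // 2
--         if is_possible(mid):
--             right = mid
--         else:
--             left = mid
--     mi = right
--
--     if mi > cnt1:
--         return [-1]
--     return list(range(mi, cnt1 + 1))
-- ===== SOURCE B (Python) =====
-- # B: same result, different construction — chain ends are built directly in ascending order
-- # (no mutable last[] array, no resort), leftovers are drained per distinct value from the
-- # Counter (no flat 'remaining' list), and the greedy match uses a partition + ordered insert
-- # instead of bisect on a mutated list; the binary search is recursive.
-- from collections import Counter
--
--
-- def _insert_sorted(xs, v):
--     out = []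
--     i = 0
--     while i < len(xs) and xs[i] <= v:
--         out.append(xs[i])
--         i += 1
--     return out + [v] + xs[i:]
--
--
-- def compute_possible_m(a):
--     freq = Counter(a)
--     ones = freq.get(1, 0)
--
--     def feasible(m):
--         if ones < m:
--             return False
--         # walk powers of two, emitting finished chain ends in ascending order
--         used = {}
--         ends = []
--         cnt = m
--         p = 2
--         while cnt > 0 and freq.get(p, 0) > 0:
--             take = min(freq[p], cnt)
--             used[p] = take
--             ends = ends + [p // 2] * (cnt - take)
--             cnt = take
--             p *= 2
--         ends = ends + [p // 2] * cnt
--         # drain leftover copies of each distinct value, ascending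
--         for v in sorted(freq):
--             left = freq[v] - (m if v == 1 else 0) - used.get(v, 0)
--             for _ in range(left):
--                 need = (v + 1) // 2
--                 pre = [e for e in ends if e < need]
--                 post = [e for e in ends if e >= need]
--                 if not post:
--                     return False
--                 ends = _insert_sorted(pre + post[1:], v)
--         return True
--
--     def search(lo, hi):
--         if lo >= hi - 1:
--             return hi
--         mid = (lo + hi) // 2
--         if feasible(mid):
--             return search(lo, mid)
--         return search(mid, hi)
--
--     mi = search(0, ones + 1)
--     if mi > ones:
--         return [-1]
--     return list(range(mi, ones + 1))
-- ===== Notes on version B (the rewrite author's own statement) =====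
-- stated objective: alternative
-- what changed: The feasibility check is rebuilt: chain ends are emitted directly in ascending order from the power-of-two walk (no mutable last[] array rewritten by an inner loop and re-sorted), leftovers are drained per distinct Counter key instead of materialising a flat remaining list, and each greedy match partitions the sorted end list and re-inserts with an ordered-insert scan instead of bisect_left + del + bisect.insort; the binary search is recursive.
import Mathlib
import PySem

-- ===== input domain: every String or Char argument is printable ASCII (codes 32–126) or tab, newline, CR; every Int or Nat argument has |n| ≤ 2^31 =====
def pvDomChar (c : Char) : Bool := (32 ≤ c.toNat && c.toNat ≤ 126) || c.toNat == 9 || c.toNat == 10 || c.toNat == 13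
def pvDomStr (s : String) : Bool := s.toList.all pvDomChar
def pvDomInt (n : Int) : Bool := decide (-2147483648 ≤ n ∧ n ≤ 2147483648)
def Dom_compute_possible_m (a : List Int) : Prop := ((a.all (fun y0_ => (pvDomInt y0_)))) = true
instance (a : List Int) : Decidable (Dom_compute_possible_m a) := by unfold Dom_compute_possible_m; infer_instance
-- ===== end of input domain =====

-- B re-implements the feasibility check with a structurally different construction (direct
-- ascending chain-end list, per-distinct-value draining, partition + ordered insert instead of
-- bisect/del/insort on a mutated array); same return value, no speed claim.

-- ===== PORT A =====

-- the 'while current_freq.get(current_power,0) > 0 and cnt > 0' loop of is_possible.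
-- Fuel: each executed iteration consumes ≥ 1 element at a fresh key (powers strictly increase),
-- so the loop runs at most len(a) iterations and fuel len(a)+1 is never exhausted.
def pvPhase1A : Nat → PySem.Dict Int Int → Int → Int → List Int →
    (PySem.Dict Int Int × Int × Int × List Int)
  | 0, cf, p, cnt, last => (cf, p, cnt, last)
  | f + 1, cf, p, cnt, last =>
    if cf.getD p 0 > 0 ∧ cnt > 0 then
      let available := cf.getD p 0
      let take := min available cnt
      let cf' := cf.insert p (available - take)
      -- 'for i in range(take): last[i] = current_power'
      let last' := (PySem.List.pyRange 0 take 1).foldl (fun l i => PySem.List.pySetD l i p) last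
      pvPhase1A f cf' (p * 2) take last'
    else (cf, p, cnt, last)

-- the 'for num in remaining' matching loop (del guarded by idx < len, then bisect.insort)
def pvMatchA : List Int → List Int → Bool
  | [], _ => true
  | num :: rest, ls =>
    let required := PySem.Int.floordiv (num + 1) 2
    let idx := PySem.List.bisectLeft ls required
    if ls.length ≤ idx then false
    else
      let ls1 := ls.eraseIdx idx
      pvMatchA rest (PySem.List.insert ls1 ((PySem.List.bisectRight ls1 num : Nat) : Int) num)

def pvIsPossibleA (freq : PySem.Dict Int Int) (fuel : Nat) (m : Int) : Bool :=
  if freq.getD 1 0 < m then false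
  else
    let cf := freq.insert 1 (freq.getD 1 0 - m)
    let r := pvPhase1A fuel cf 2 m (PySem.List.pyRepeat [(1 : Int)] m)
    let lastSorted := PySem.List.sorted r.2.2.2 (fun x => x) false
    -- sorted(current_freq.items()): dict keys are pairwise distinct, so Python's tuple sort
    -- of the items coincides with sorting by the key component — exact here.
    let remaining := (PySem.List.sorted r.1.items (fun kv => kv.1) false).foldl
        (fun acc kv => if kv.2 > 0 then acc ++ PySem.List.pyRepeat [kv.1] kv.2 else acc) []
    pvMatchA remaining lastSorted

def pvBSearchA (freq : PySem.Dict Int Int) (fuel : Nat) (l r : Int) : Int :=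
  if h : l < r - 1 then
    let mid := PySem.Int.floordiv (l + r) 2
    if pvIsPossibleA freq fuel mid then pvBSearchA freq fuel l mid else pvBSearchA freq fuel mid r
  else r
termination_by (r - l).toNat
decreasing_by
  · have h1 : l + 1 ≤ PySem.Int.floordiv (l + r) 2 :=
      (PySem.Int.le_floordiv_iff_mul_le (by omega)).2 (by omega)
    have h2 : PySem.Int.floordiv (l + r) 2 < r :=
      (PySem.Int.floordiv_lt_iff_lt_mul (by omega)).2 (by omega)
    omega
  · have h1 : l + 1 ≤ PySem.Int.floordiv (l + r) 2 :=
      (PySem.Int.le_floordiv_iff_mul_le (by omega)).2 (by omega)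
    have h2 : PySem.Int.floordiv (l + r) 2 < r :=
      (PySem.Int.floordiv_lt_iff_lt_mul (by omega)).2 (by omega)
    omega

def compute_possible_m (a : List Int) : List Int :=
  let cnt1 : Int := (PySem.List.count a 1 : Int)
  let aSorted := PySem.List.sorted a (fun x => x) false
  let freq := aSorted.foldl (fun d x => d.modify x 0 (· + 1)) PySem.Dict.empty
  let mi := pvBSearchA freq (a.length + 1) 0 (cnt1 + 1)
  if cnt1 < mi then [-1] else PySem.List.pyRange mi (cnt1 + 1) 1

-- ===== PORT B =====

-- _insert_sorted's scan loop
def pvInsertSortedB (xs : List Int) (v : Int) : List Int :=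
  match xs with
  | [] => [v]
  | x :: t => if x ≤ v then x :: pvInsertSortedB t v else v :: x :: t

-- Source B's 'while cnt > 0 and freq.get(p, 0) > 0' loop; same fuel remark as for A's loop
def pvPhase1B (freq : PySem.Dict Int Int) : Nat → Int → Int → List Int → PySem.Dict Int Int →
    (List Int × PySem.Dict Int Int × Int × Int)
  | 0, p, cnt, ends, used => (ends, used, p, cnt)
  | f + 1, p, cnt, ends, used =>
    if cnt > 0 ∧ freq.getD p 0 > 0 then
      let take := min (freq.getD p 0) cnt
      pvPhase1B freq f (p * 2) take
        (ends ++ PySem.List.pyRepeat [PySem.Int.floordiv p 2] (cnt - take))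
        (used.insert p take)
    else (ends, used, p, cnt)

def pvMatchOneB (ends : List Int) (v : Int) : Option (List Int) :=
  let need := PySem.Int.floordiv (v + 1) 2
  let pre := ends.filter (fun e => e < need)
  let post := ends.filter (fun e => need ≤ e)
  match post with
  | [] => none
  | _ :: t => some (pvInsertSortedB (pre ++ t) v)

-- 'for _ in range(left)'
def pvMatchManyB (v : Int) : Nat → List Int → Option (List Int)
  | 0, ends => some ends
  | k + 1, ends =>
    match pvMatchOneB ends v with
    | none => none
    | some e' => pvMatchManyB v k e'

-- 'for v in sorted(freq)'
def pvMatchKeysB (freq used : PySem.Dict Int Int) (m : Int) : List Int → List Int → Bool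
  | [], _ => true
  | v :: vs, ends =>
    let left := freq.getD v 0 - (if v = 1 then m else 0) - used.getD v 0
    match pvMatchManyB v left.toNat ends with
    | none => false
    | some e' => pvMatchKeysB freq used m vs e'

def pvFeasibleB (freq : PySem.Dict Int Int) (ones : Int) (fuel : Nat) (m : Int) : Bool :=
  if ones < m then false
  else
    let r := pvPhase1B freq fuel 2 m [] PySem.Dict.empty
    let ends := r.1 ++ PySem.List.pyRepeat [PySem.Int.floordiv r.2.2.1 2] r.2.2.2
    pvMatchKeysB freq r.2.1 m (PySem.List.sorted freq.keys (fun x => x) false) ends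

def pvSearchB (freq : PySem.Dict Int Int) (ones : Int) (fuel : Nat) (lo hi : Int) : Int :=
  if h : lo < hi - 1 then
    let mid := PySem.Int.floordiv (lo + hi) 2
    if pvFeasibleB freq ones fuel mid then pvSearchB freq ones fuel lo mid
    else pvSearchB freq ones fuel mid hi
  else hi
termination_by (hi - lo).toNat
decreasing_by
  · have h1 : lo + 1 ≤ PySem.Int.floordiv (lo + hi) 2 :=
      (PySem.Int.le_floordiv_iff_mul_le (by omega)).2 (by omega)
    have h2 : PySem.Int.floordiv (lo + hi) 2 < hi :=
      (PySem.Int.floordiv_lt_iff_lt_mul (by omega)).2 (by omega)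
    omega
  · have h1 : lo + 1 ≤ PySem.Int.floordiv (lo + hi) 2 :=
      (PySem.Int.le_floordiv_iff_mul_le (by omega)).2 (by omega)
    have h2 : PySem.Int.floordiv (lo + hi) 2 < hi :=
      (PySem.Int.floordiv_lt_iff_lt_mul (by omega)).2 (by omega)
    omega

def compute_possible_m_alt (a : List Int) : List Int :=
  let freq := PySem.Dict.counter a
  let ones := freq.getD 1 0
  let mi := pvSearchB freq ones (a.length + 1) 0 (ones + 1)
  if ones < mi then [-1] else PySem.List.pyRange mi (ones + 1) 1

-- ===== PRECONDITION & SPEC =====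
def Spec_compute_possible_m (a : List Int) (out : List Int) : Prop := out = compute_possible_m_alt a
instance (a : List Int) (out : List Int) : Decidable (Spec_compute_possible_m a out) := by
  unfold Spec_compute_possible_m; infer_instance

-- ===== CLAIM (what is proved, stated in full; the proofs are below) =====
def Claim_equal_compute_possible_m : Prop :=
  ∀ (a : List Int), Dom_compute_possible_m a → Spec_compute_possible_m a (compute_possible_m a)

-- ===== LEMMAS AND PROOFS =====

-- ---- helper: the prefix-write loop of A
theorem pv_writes (p : Int) : ∀ (n : Nat) (last : List Int), n ≤ last.length →
    (PySem.List.pyRange 0 (n : Int) 1).foldl (fun l i => PySem.List.pySetD l i p) last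
      = List.replicate n p ++ last.drop n := by
  intro n
  induction n with
  | zero =>
    intro last h
    rw [show ((0 : Nat) : Int) = 0 from rfl, PySem.List.pyRange_one_eq_nil (le_refl (0 : Int))]
    simp
  | succ n ih =>
    intro last h
    have hc : ((n + 1 : Nat) : Int) = (n : Int) + 1 := by push_cast; ring
    rw [hc, PySem.List.pyRange_one_succ_right (by exact_mod_cast Nat.zero_le n), List.foldl_append]
    rw [ih last (by omega)]
    simp only [List.foldl_cons, List.foldl_nil]
    rw [PySem.List.pySetD_natCast]
    have hlt : n < last.length := by omega
    rw [List.set_append_right n p (by simp)]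
    simp only [List.length_replicate, Nat.sub_self]
    rw [List.drop_eq_getElem_cons hlt, List.set_cons_zero, List.replicate_succ']
    simp

-- ---- small floordiv facts
theorem pv_fd_mul2 (p : Int) (hp : 0 ≤ p) : PySem.Int.floordiv (p * 2) 2 = p := by
  rw [PySem.Int.floordiv_eq_iff_of_pos (by omega)]; omega

theorem pv_fd_le (p : Int) (hp : 0 ≤ p) : PySem.Int.floordiv p 2 ≤ p := by
  have := (PySem.Int.floordiv_lt_iff_lt_mul (a := p) (b := 2) (q := p + 1) (by omega)).2 (by omega)
  omega

theorem pv_contains_of_getD_pos {d : PySem.Dict Int Int} {k : Int} (h : d.getD k 0 ≠ 0) :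
    d.contains k = true := by
  cases hc : d.contains k
  · exact absurd (PySem.Dict.getD_of_not_contains d 0 hc) h
  · rfl

-- ---- the joint invariant of A's and B's power-of-two loops
def pvInv (fb : PySem.Dict Int Int) (m : Int) (K0 : List Int)
    (cf : PySem.Dict Int Int) (p cnt : Int) (last ends : List Int)
    (used : PySem.Dict Int Int) : Prop :=
  2 ≤ p ∧ 0 ≤ cnt ∧
  last = List.replicate cnt.toNat (PySem.Int.floordiv p 2) ++ ends.reverse ∧
  (∀ e ∈ ends, e ≤ PySem.Int.floordiv p 2) ∧
  List.Pairwise (· ≤ ·) ends ∧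
  (∀ v : Int, cf.getD v 0 = fb.getD v 0 - (if v = 1 then m else 0) - used.getD v 0) ∧
  (∀ k ∈ used.keys, 2 ≤ k ∧ k < p) ∧
  cf.keys = K0

-- ---- simulation: A's loop and B's loop walk in lockstep
theorem pv_phase1_sim (fb : PySem.Dict Int Int) (m : Int) (K0 : List Int) :
    ∀ (f : Nat) (cf : PySem.Dict Int Int) (p cnt : Int) (last ends : List Int)
      (used : PySem.Dict Int Int),
    pvInv fb m K0 cf p cnt last ends used →
    (pvPhase1A f cf p cnt last).2.1 = (pvPhase1B fb f p cnt ends used).2.2.1 ∧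
    (pvPhase1A f cf p cnt last).2.2.1 = (pvPhase1B fb f p cnt ends used).2.2.2 ∧
    pvInv fb m K0 (pvPhase1A f cf p cnt last).1 (pvPhase1A f cf p cnt last).2.1
      (pvPhase1A f cf p cnt last).2.2.1 (pvPhase1A f cf p cnt last).2.2.2
      (pvPhase1B fb f p cnt ends used).1 (pvPhase1B fb f p cnt ends used).2.1 := by
  intro f
  induction f with
  | zero => intro cf p cnt last ends used hinv; exact ⟨rfl, rfl, hinv⟩
  | succ f ih =>
    intro cf p cnt last ends used hinv
    obtain ⟨hp2, hcnt, hlast, hendsle, hendssort, hcf, hkeysused, hK⟩ := hinv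
    have hup : used.getD p 0 = 0 := by
      apply PySem.Dict.getD_of_not_contains
      cases hc : used.contains p
      · rfl
      · exact absurd ((PySem.Dict.contains_iff_mem_keys used p).1 hc)
          (fun hm => by have := hkeysused p hm; omega)
    have hcfp : cf.getD p 0 = fb.getD p 0 := by
      rw [hcf p, hup, if_neg (by omega)]; ring
    have hguard : (cf.getD p 0 > 0 ∧ cnt > 0) ↔ (cnt > 0 ∧ fb.getD p 0 > 0) := by
      rw [hcfp]; tauto
    by_cases hg : cf.getD p 0 > 0 ∧ cnt > 0
    · -- both loops iterate
      rw [pvPhase1A, pvPhase1B, if_pos hg, if_pos (hguard.1 hg)]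
      simp only
      set q := PySem.Int.floordiv p 2 with hq
      have htk0 : 0 < min (cf.getD p 0) cnt := lt_min hg.1 hg.2
      have htkc : min (cf.getD p 0) cnt ≤ cnt := min_le_right _ _
      set tk := min (cf.getD p 0) cnt with htk
      have hfb_tk : min (fb.getD p 0) cnt = tk := by rw [← hcfp]
      rw [hfb_tk]
      -- A's written array
      have hlen : cnt.toNat ≤ last.length := by
        rw [hlast]; simp
      have hwr : (PySem.List.pyRange 0 tk 1).foldl (fun l i => PySem.List.pySetD l i p) last
          = List.replicate tk.toNat p ++ last.drop tk.toNat := by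
        have : tk = ((tk.toNat : Nat) : Int) := by omega
        rw [this]
        exact pv_writes p tk.toNat last (by omega)
      apply ih
      constructor
      · omega
      refine ⟨by omega, ?_, ?_, ?_, ?_, ?_, ?_⟩
      · -- array shape
        rw [hwr, hlast, List.drop_append_of_le_length (by simp; omega),
          List.drop_replicate, pv_fd_mul2 p (by omega)]
        rw [PySem.List.pyRepeat_singleton, List.reverse_append, List.reverse_replicate]
        have : (cnt - tk).toNat = cnt.toNat - tk.toNat := by omega
        rw [this]
      · -- new ends bounded by floordiv (p*2) 2 = p
        intro e he
        rw [pv_fd_mul2 p (by omega)]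
        rw [PySem.List.pyRepeat_singleton] at he
        rcases List.mem_append.1 he with h | h
        · exact le_trans (hendsle e h) (pv_fd_le p (by omega))
        · rw [List.eq_of_mem_replicate h]; exact pv_fd_le p (by omega)
      · -- pairwise
        rw [PySem.List.pyRepeat_singleton]
        rw [List.pairwise_append]
        refine ⟨hendssort, List.pairwise_replicate.2 (Or.inr (le_refl _)), ?_⟩
        intro e he e' he'
        rw [List.eq_of_mem_replicate he']
        exact hendsle e he
      · -- dict lookups
        intro v
        rw [PySem.Dict.getD_insert, PySem.Dict.getD_insert]
        by_cases hv : v = p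
        · rw [if_pos hv, if_pos hv, hv, hcfp, if_neg (by omega)]; ring
        · rw [if_neg hv, if_neg hv, hcf v]
      · -- used keys bounded
        intro k hk
        rcases (PySem.Dict.mem_keys_insert _ _ _ _).1 hk with h | h
        · omega
        · have := hkeysused k h; omega
      · -- cf keys unchanged
        rw [PySem.Dict.keys_insert_of_contains cf _ (pv_contains_of_getD_pos (by omega)), hK]
    · -- both loops stop
      rw [pvPhase1A, pvPhase1B, if_neg hg, if_neg (fun hb => hg (hguard.2 hb))]
      exact ⟨rfl, rfl, hp2, hcnt, hlast, hendsle, hendssort, hcf, hkeysused, hK⟩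

-- ---- characterizing filters on a sorted list by an index split
theorem pv_filter_char (P : Int → Bool) : ∀ (xs : List Int) (k : Nat), k ≤ xs.length →
    (∀ (j : Nat) (hj : j < xs.length), j < k → P xs[j] = true) →
    (∀ (j : Nat) (hj : j < xs.length), k ≤ j → P xs[j] = false) →
    xs.filter P = xs.take k ∧ xs.filter (fun e => !(P e)) = xs.drop k := by
  intro xs
  induction xs with
  | nil => intro k hk _ _; simp_all
  | cons x t ih =>
    intro k hk hlt hge
    cases k with
    | zero =>
      have hall : ∀ e ∈ x :: t, P e = false := by
        intro e he
        obtain ⟨j, hj, rfl⟩ := List.mem_iff_getElem.1 he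
        exact hge j hj (Nat.zero_le j)
      constructor
      · rw [List.filter_eq_nil_iff.2 (fun e he => by simp [hall e he])]; rfl
      · rw [List.filter_eq_self.2 (fun e he => by simp [hall e he])]; rfl
    | succ k =>
      have hx : P x = true := hlt 0 (by simp) (Nat.succ_pos k)
      have ihk := ih k (by simpa using hk)
        (fun j hj hjk => hlt (j + 1) (by simpa using hj) (by omega))
        (fun j hj hjk => hge (j + 1) (by simpa using hj) (by omega))
      constructor
      · rw [List.filter_cons_of_pos hx, List.take_succ_cons, ihk.1]
      · rw [List.filter_cons_of_neg (by simp [hx]), List.drop_succ_cons, ihk.2]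

-- ---- _insert_sorted on a sorted list, as filters
theorem pv_insB_filters (v : Int) : ∀ (xs : List Int), List.Pairwise (· ≤ ·) xs →
    pvInsertSortedB xs v
      = xs.filter (fun e => e ≤ v) ++ v :: xs.filter (fun e => !(decide (e ≤ v))) := by
  intro xs
  induction xs with
  | nil => simp [pvInsertSortedB]
  | cons x t ih =>
    intro hs
    rw [pvInsertSortedB]
    by_cases hx : x ≤ v
    · rw [if_pos hx, List.filter_cons_of_pos (by simpa using hx), ih hs.of_cons,
        List.filter_cons_of_neg (by simpa using hx)]
      rfl
    · rw [if_neg hx, List.filter_cons_of_neg (by simpa using hx),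
        List.filter_cons_of_pos (by simpa using hx)]
      have hnil : t.filter (fun e => decide (e ≤ v)) = [] :=
        List.filter_eq_nil_iff.2 (fun e he => by
          have := List.rel_of_pairwise_cons hs he
          simp; omega)
      have hself : t.filter (fun e => !(decide (e ≤ v))) = t :=
        List.filter_eq_self.2 (fun e he => by
          have := List.rel_of_pairwise_cons hs he
          simp; omega)
      rw [hnil, hself]
      rfl

theorem pv_insB_mem {xs : List Int} {v y : Int} (h : y ∈ pvInsertSortedB xs v) :
    y = v ∨ y ∈ xs := by
  induction xs with
  | nil => simp [pvInsertSortedB] at h; tauto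
  | cons x t ih =>
    rw [pvInsertSortedB] at h
    by_cases hx : x ≤ v
    · rw [if_pos hx] at h
      rcases List.mem_cons.1 h with h | h
      · exact Or.inr (by simp [h])
      · rcases ih h with h | h
        · exact Or.inl h
        · exact Or.inr (List.mem_cons_of_mem x h)
    · rw [if_neg hx] at h
      simpa using h

theorem pv_insB_sorted {xs : List Int} (v : Int) (hs : List.Pairwise (· ≤ ·) xs) :
    List.Pairwise (· ≤ ·) (pvInsertSortedB xs v) := by
  induction xs with
  | nil => simp [pvInsertSortedB]
  | cons x t ih =>
    rw [pvInsertSortedB]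
    by_cases hx : x ≤ v
    · rw [if_pos hx]
      refine List.pairwise_cons.2 ⟨?_, ih hs.of_cons⟩
      intro y hy
      rcases pv_insB_mem hy with h | h
      · omega
      · exact List.rel_of_pairwise_cons hs h
    · rw [if_neg hx]
      refine List.pairwise_cons.2 ⟨?_, hs⟩
      intro y hy
      rcases List.mem_cons.1 hy with h | h
      · omega
      · have := List.rel_of_pairwise_cons hs h; omega

-- ---- the spec driver the two match loops both implement
def pvRun : List Int → List Int → Bool
  | [], _ => true
  | v :: rest, ends =>
    match pvMatchOneB ends v with
    | none => false
    | some e' => pvRun rest e'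

theorem pv_matchA_run : ∀ (l ls : List Int), List.Pairwise (· ≤ ·) ls →
    pvMatchA l ls = pvRun l ls := by
  intro l
  induction l with
  | nil => intro ls _; rfl
  | cons v rest ih =>
    intro ls hs
    rw [pvMatchA, pvRun]
    set need := PySem.Int.floordiv (v + 1) 2 with hneed
    set k := PySem.List.bisectLeft ls need with hk
    obtain ⟨hklen, hbl, hbr⟩ := PySem.List.bisectLeft_spec ls need hs
    have hchar := pv_filter_char (fun e => decide (e < need)) ls k hklen
      (fun j hj hjk => by simpa using hbl j hj hjk)
      (fun j hj hjk => by simpa using not_lt.2 (hbr j hj hjk))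
    have hpre : ls.filter (fun e => decide (e < need)) = ls.take k := hchar.1
    have hpost : ls.filter (fun e => decide (need ≤ e)) = ls.drop k := by
      rw [← hchar.2]
      exact List.filter_congr (fun e _ => by
        rw [← decide_not]; exact decide_eq_decide.2 (by omega))
    by_cases hlen : ls.length ≤ k
    · rw [if_pos hlen]
      unfold pvMatchOneB
      simp only [← hneed, hpost, List.drop_eq_nil_of_le hlen]
    · rw [if_neg hlen]
      rw [not_le] at hlen
      unfold pvMatchOneB
      simp only [← hneed, hpre, hpost, List.drop_eq_getElem_cons hlen]
      have hsub : List.Pairwise (· ≤ ·) (ls.eraseIdx k) :=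
        List.Pairwise.sublist (List.eraseIdx_sublist ls k) hs
      have herase : ls.eraseIdx k = ls.take k ++ ls.drop (k + 1) :=
        List.eraseIdx_eq_take_drop_succ ls k
      -- insort = _insert_sorted on the sorted eraseIdx list
      obtain ⟨hrlen, hrl, hrr⟩ := PySem.List.bisectRight_spec (ls.eraseIdx k) v hsub
      set j := PySem.List.bisectRight (ls.eraseIdx k) v with hj
      have hchar2 := pv_filter_char (fun e => decide (e ≤ v)) (ls.eraseIdx k) j hrlen
        (fun i hi hik => by simpa using hrl i hi hik)
        (fun i hi hik => by simpa using not_le.2 (hrr i hi hik))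
      have hins : PySem.List.insert (ls.eraseIdx k) ((j : Nat) : Int) v
          = pvInsertSortedB (ls.eraseIdx k) v := by
        rw [PySem.List.insert_natCast _ _ _ hrlen, pv_insB_filters v _ hsub,
          hchar2.1, hchar2.2]
      rw [hins, herase]
      exact ih _ (pv_insB_sorted v (herase ▸ hsub))

theorem pv_many_run (v : Int) (rest : List Int) : ∀ (n : Nat) (ends : List Int),
    (match pvMatchManyB v n ends with
     | none => false
     | some e' => pvRun rest e') = pvRun (List.replicate n v ++ rest) ends := by
  intro n
  induction n with
  | zero => intro ends; rfl
  | succ n ih =>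
    intro ends
    rw [List.replicate_succ, List.cons_append, pvRun, pvMatchManyB]
    cases h : pvMatchOneB ends v with
    | none => rfl
    | some e' => exact ih e'

theorem pv_keys_run (fb used : PySem.Dict Int Int) (m : Int) :
    ∀ (keys ends : List Int),
    pvMatchKeysB fb used m keys ends
      = pvRun (keys.flatMap (fun v =>
          List.replicate (fb.getD v 0 - (if v = 1 then m else 0) - used.getD v 0).toNat v)) ends := by
  intro keys
  induction keys with
  | nil => intro ends; rfl
  | cons v vs ih =>
    intro ends
    rw [pvMatchKeysB, List.flatMap_cons, ← pv_many_run]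
    cases h : pvMatchManyB v (fb.getD v 0 - (if v = 1 then m else 0) - used.getD v 0).toNat ends with
    | none => rfl
    | some e' => exact ih e'

-- ---- the two feasibility checks agree for every probed m
theorem pv_feasible_eq (a : List Int) (m : Int)
    (h1 : 1 ≤ m) (h2 : m ≤ (PySem.List.count a 1 : Int)) :
    pvIsPossibleA ((PySem.List.sorted a (fun x => x) false).foldl
        (fun d x => d.modify x 0 (· + 1)) PySem.Dict.empty) (a.length + 1) m
      = pvFeasibleB (PySem.Dict.counter a) ((PySem.Dict.counter a).getD 1 0) (a.length + 1) m := by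
  set aS := PySem.List.sorted a (fun x => x) false with haS
  set fb := PySem.Dict.counter a with hfb
  have hfold : aS.foldl (fun d x => d.modify x 0 (· + 1)) PySem.Dict.empty
      = PySem.Dict.counter aS := (PySem.Dict.counter_eq_foldl aS).symm
  rw [hfold]
  set fa := PySem.Dict.counter aS with hfa
  have hcnt : ∀ v : Int, fa.getD v 0 = fb.getD v 0 := by
    intro v
    rw [hfa, hfb, PySem.Dict.getD_counter, PySem.Dict.getD_counter,
      (PySem.List.sorted_perm a (fun x => x) false).count_eq]
  have hones : fb.getD 1 0 = (PySem.List.count a 1 : Int) := by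
    rw [hfb, PySem.Dict.getD_counter, PySem.List.count_eq]
  have hfa1 : fa.getD 1 0 = (PySem.List.count a 1 : Int) := by rw [hcnt 1, hones]
  unfold pvIsPossibleA pvFeasibleB
  rw [if_neg (by omega), if_neg (by omega)]
  simp only
  set cf0 := fa.insert 1 (fa.getD 1 0 - m) with hcf0
  have hK0 : cf0.keys = fa.keys :=
    PySem.Dict.keys_insert_of_contains fa _ (pv_contains_of_getD_pos (by omega))
  -- initial joint invariant
  have hinv0 : pvInv fb m fa.keys cf0 2 m (PySem.List.pyRepeat [(1 : Int)] m) [] PySem.Dict.empty := by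
    refine ⟨le_refl 2, by omega, ?_, by simp, by simp, ?_, by simp [PySem.Dict.keys_empty], hK0⟩
    · rw [PySem.List.pyRepeat_singleton, show PySem.Int.floordiv 2 2 = 1 from by decide]
      simp
    · intro v
      rw [hcf0, PySem.Dict.getD_insert, PySem.Dict.getD_empty]
      by_cases hv : v = 1
      · rw [if_pos hv, if_pos hv, hv, hcnt 1]; ring
      · rw [if_neg hv, if_neg hv, hcnt v]; ring
  have hsim := pv_phase1_sim fb m fa.keys (a.length + 1) cf0 2 m
    (PySem.List.pyRepeat [(1 : Int)] m) [] PySem.Dict.empty hinv0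
  set RA := pvPhase1A (a.length + 1) cf0 2 m (PySem.List.pyRepeat [(1 : Int)] m) with hRA
  set RB := pvPhase1B fb (a.length + 1) 2 m [] PySem.Dict.empty with hRB
  obtain ⟨hpeq, hcnteq, hp2', hcnt', hlast', hendsle', hendssort', hcf', hused', hK'⟩ := hsim
  set q := PySem.Int.floordiv RB.2.2.1 2 with hq
  -- (α) A's sorted chain-end array is B's ascending chain-end list
  have hends : PySem.List.sorted RA.2.2.2 (fun x => x) false
      = RB.1 ++ PySem.List.pyRepeat [q] RB.2.2.2 := by
    rw [PySem.List.pyRepeat_singleton]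
    apply PySem.List.sorted_id_eq_of_perm_of_pairwise
    · have p1 : (RB.1 ++ List.replicate RB.2.2.2.toNat q).Perm
          (List.replicate RB.2.2.2.toNat q ++ RB.1) := List.perm_append_comm
      have p2 : (List.replicate RB.2.2.2.toNat q ++ RB.1).Perm
          (List.replicate RB.2.2.2.toNat q ++ RB.1.reverse) :=
        (RB.1.reverse_perm).symm.append_left _
      have p3 : List.replicate RB.2.2.2.toNat q ++ RB.1.reverse = RA.2.2.2 := by
        rw [hlast', hcnteq, hpeq, ← hq]
      exact (p1.trans p2).trans (p3 ▸ List.Perm.refl _)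
    · rw [List.pairwise_append]
      refine ⟨hendssort', List.pairwise_replicate.2 (Or.inr (le_refl _)), ?_⟩
      intro e he e' he'
      rw [List.eq_of_mem_replicate he', hq, ← hpeq]
      exact hendsle' e he
  -- (γ) A's 'remaining' list is the flatMap over the sorted distinct keys
  have hnodK : fa.keys.Nodup := PySem.Dict.nodup_keys_counter aS
  have hitems : RA.1.items = fa.keys.map (fun k => (k, RA.1.getD k 0)) := by
    rw [← hK']
    exact PySem.Dict.items_eq_map_keys RA.1 (hK' ▸ hnodK) 0
  have hsortedK : List.Pairwise (· ≤ ·) (PySem.List.sorted fa.keys (fun x => x) false) :=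
    PySem.List.sorted_pairwise fa.keys (fun x => x)
  have hnodSK : (PySem.List.sorted fa.keys (fun x => x) false).Nodup :=
    (PySem.List.sorted_perm fa.keys (fun x => x) false).nodup_iff.2 hnodK
  have hsortedItems : PySem.List.sorted RA.1.items (fun kv => kv.1) false
      = (PySem.List.sorted fa.keys (fun x => x) false).map (fun k => (k, RA.1.getD k 0)) := by
    apply PySem.List.sorted_eq_of_perm_of_pairwise_lt
    · rw [hitems]
      exact (PySem.List.sorted_perm fa.keys (fun x => x) false).map _
    · rw [List.pairwise_map]
      exact (hsortedK.and hnodSK).imp (fun h => lt_of_le_of_ne h.1 h.2)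
  have hfold2 : ∀ (L : List (Int × Int)) (acc : List Int),
      L.foldl (fun acc kv => if kv.2 > 0 then acc ++ PySem.List.pyRepeat [kv.1] kv.2 else acc) acc
        = acc ++ L.flatMap (fun kv => List.replicate kv.2.toNat kv.1) := by
    intro L
    induction L with
    | nil => intro acc; simp
    | cons kv t ih =>
      intro acc
      rw [List.foldl_cons, List.flatMap_cons, PySem.List.pyRepeat_singleton]
      by_cases hpos : kv.2 > 0
      · rw [if_pos hpos, ih, List.append_assoc]
      · rw [if_neg hpos, ih, Int.toNat_of_nonpos (by omega)]
        simp
  have hrem : (PySem.List.sorted RA.1.items (fun kv => kv.1) false).foldl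
      (fun acc kv => if kv.2 > 0 then acc ++ PySem.List.pyRepeat [kv.1] kv.2 else acc) []
      = (PySem.List.sorted fa.keys (fun x => x) false).flatMap
          (fun k => List.replicate (RA.1.getD k 0).toNat k) := by
    rw [hfold2, List.nil_append, hsortedItems, List.flatMap_map]
  -- (ε) B's sorted distinct keys are A's
  have hkeysBA : PySem.List.sorted fb.keys (fun x => x) false
      = PySem.List.sorted fa.keys (fun x => x) false := by
    apply PySem.List.sorted_eq_sorted_of_perm _ _ _ (fun x y h => h)
    rw [hfb, hfa, PySem.Dict.keys_counter, PySem.Dict.keys_counter]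
    refine (List.perm_ext_iff_of_nodup (PySem.Set.nodup_ofList a)
      ((PySem.Set.nodup_ofList aS))).2 ?_
    intro x
    rw [PySem.Set.mem_ofList, PySem.Set.mem_ofList, haS, PySem.List.mem_sorted]
  -- assemble both sides as pvRun on the same data
  have hfuneq : (fun v => List.replicate
        ((fb.getD v 0 - if v = 1 then m else 0) - RB.2.1.getD v 0).toNat v)
      = (fun k => List.replicate (RA.1.getD k 0).toNat k) := by
    funext k; rw [← hcf' k]
  rw [hrem, pv_matchA_run _ _ (by simpa using PySem.List.sorted_pairwise RA.2.2.2 (fun x => x)),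
    hends, pv_keys_run, hkeysBA, hfuneq]

-- ---- the two binary searches agree once the probed predicate agrees
theorem pv_bs_eq (freqA fb : PySem.Dict Int Int) (ones : Int) (fuel : Nat) :
    ∀ (n : Nat) (l r : Int), (r - l).toNat ≤ n →
    (∀ m, l < m → m < r → pvIsPossibleA freqA fuel m = pvFeasibleB fb ones fuel m) →
    pvBSearchA freqA fuel l r = pvSearchB fb ones fuel l r := by
  intro n
  induction n with
  | zero =>
    intro l r hn hp
    rw [pvBSearchA, pvSearchB, dif_neg (by omega), dif_neg (by omega)]
  | succ n ih =>
    intro l r hn hp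
    rw [pvBSearchA, pvSearchB]
    by_cases h : l < r - 1
    · rw [dif_pos h, dif_pos h]
      have h1 : l + 1 ≤ PySem.Int.floordiv (l + r) 2 :=
        (PySem.Int.le_floordiv_iff_mul_le (by omega)).2 (by omega)
      have h2 : PySem.Int.floordiv (l + r) 2 < r :=
        (PySem.Int.floordiv_lt_iff_lt_mul (by omega)).2 (by omega)
      simp only
      rw [hp _ (by omega) (by omega)]
      by_cases hf : pvFeasibleB fb ones fuel (PySem.Int.floordiv (l + r) 2)
      · rw [if_pos hf, if_pos hf]
        exact ih l _ (by omega) (fun mm hm1 hm2 => hp mm hm1 (by omega))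
      · rw [if_neg hf, if_neg hf]
        exact ih _ r (by omega) (fun mm hm1 hm2 => hp mm (by omega) hm2)
    · rw [dif_neg h, dif_neg h]

theorem pv_main (a : List Int) : compute_possible_m a = compute_possible_m_alt a := by
  unfold compute_possible_m compute_possible_m_alt
  simp only
  have hones : (PySem.Dict.counter a).getD 1 0 = (PySem.List.count a 1 : Int) := by
    rw [PySem.Dict.getD_counter, PySem.List.count_eq]
  rw [hones]
  have hbs := pv_bs_eq ((PySem.List.sorted a (fun x => x) false).foldl
      (fun d x => d.modify x 0 (· + 1)) PySem.Dict.empty)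
    (PySem.Dict.counter a) ((PySem.List.count a 1 : Int)) (a.length + 1)
    ((PySem.List.count a 1 : Int) + 1).toNat 0 ((PySem.List.count a 1 : Int) + 1)
    (by omega)
    (fun m hm1 hm2 => by
      rw [pv_feasible_eq a m (by omega) (by omega), hones])
  rw [hbs]

-- ===== VERDICT (by name: the statement is the Claim_ definition above) =====
theorem compute_possible_m_spec : Claim_equal_compute_possible_m := by
  intro a _
  unfold Spec_compute_possible_m
  exact pv_main a
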